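-- pv_equiv track=rewrite | github.com/Stockoh/My-python-code | essai.py | auto_des
-- ===== SOURCE A (Python) =====
-- def auto_des(n):
--     r=list(str(n))
--     m=""
--     v=0
--     j=[]
--     if not "0" in r:r.append("0")
--     while True:
--         a=0
--         for i in r:
--             if i==str(v):
--                 a+=1
--                 j.append(i)
--         for z in j:
--             r.remove(z)
--
--
--         m+=str(a)
--         v+=1
--         j=[]
--         if r==[]:return int(m+"1")if "0" in m else int(m+"0")
-- ===== SOURCE B (Python) =====
-- def auto_des(n):
--     cnt = [0] * 10
--     for c in str(n):
--         cnt[int(c)] += 1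
--     if cnt[0] == 0:
--         cnt[0] = 1
--     top = max(v for v in range(10) if cnt[v] > 0)
--     m = ''.join(str(cnt[v]) for v in range(top + 1))
--     return int(m + ('1' if '0' in m else '0'))
-- ===== Notes on version B (the rewrite author's own statement) =====
-- stated objective: idiomatic
-- what changed: Replaced the destructive count-and-remove while-loop over a mutating char list with one pass filling a 10-slot digit-count array and a single join over range(top+1); Pre_ excludes n < 0, on which A never returns (the '-' character is never removed, so the while loop runs forever).
import Mathlib
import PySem

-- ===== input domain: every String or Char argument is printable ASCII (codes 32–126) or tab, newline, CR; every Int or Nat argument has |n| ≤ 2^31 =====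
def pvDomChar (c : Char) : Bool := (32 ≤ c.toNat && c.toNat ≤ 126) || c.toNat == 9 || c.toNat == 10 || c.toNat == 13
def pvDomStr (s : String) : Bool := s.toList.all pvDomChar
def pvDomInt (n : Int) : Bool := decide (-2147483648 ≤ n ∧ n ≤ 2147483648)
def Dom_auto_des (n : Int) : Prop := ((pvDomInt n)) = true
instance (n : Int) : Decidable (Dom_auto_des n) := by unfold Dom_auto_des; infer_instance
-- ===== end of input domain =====

-- B replaces A's destructive count-and-remove while-loop with one counting pass into a
-- 10-slot digit array and a single join over range(top+1) (idiomatic; return value only).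

-- ===== PORT A =====
-- the while-True loop; fuel is only a totality guard: on Pre_ (0 ≤ n) every char of r is a
-- decimal digit, v increases each round, and the loop ends no later than v = 9, so 11 rounds
-- always suffice; fuel is never exhausted on Pre_.
def auto_des_loop : Nat → List Char → List Char → Int → Int
  | 0, _, _, _ => 0
  | fuel+1, r, m, v =>
    -- a = 0; j = []; for i in r: if i == str(v): a += 1; j.append(i)
    let aj := r.foldl (fun (p : Int × List Char) i =>
        if String.ofList [i] = PySem.Int.toStr v then (p.1 + 1, p.2 ++ [i]) else p) ((0 : Int), ([] : List Char))
    -- for z in j: r.remove(z)   (each z is a member of r here, so remove? never raises)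
    let r' := aj.2.foldl (fun rr z => (PySem.List.remove? rr z).getD rr) r
    -- m += str(a)
    let m' := m ++ PySem.Int.toChars aj.1
    if r' = [] then
      (if PySem.Chars.isIn ['0'] m' then PySem.Int.ofChars? (m' ++ ['1'])
       else PySem.Int.ofChars? (m' ++ ['0'])).getD 0
    else auto_des_loop fuel r' m' (v + 1)

def auto_des (n : Int) : Int :=
  let r := (PySem.Int.toStr n).toList          -- r = list(str(n))
  let r := if '0' ∈ r then r else r ++ ['0']   -- if not "0" in r: r.append("0")
  auto_des_loop 11 r [] 0

-- ===== PORT B =====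
def auto_des_alt (n : Int) : Int :=
  -- cnt = [0]*10; for c in str(n): cnt[int(c)] += 1
  -- (int(c) is ofChars? [c]; on Pre_ it is a digit, so the ValueError branch (getD) never fires
  --  and the index is in range, so getD/set model the Python indexing exactly)
  let cnt := (PySem.Int.toStr n).toList.foldl (fun (cnt : List Int) c =>
      let idx := ((PySem.Int.ofChars? [c]).getD 0).toNat
      cnt.set idx (cnt.getD idx 0 + 1)) (List.replicate 10 0)
  -- if cnt[0] == 0: cnt[0] = 1
  let cnt := if cnt.getD 0 0 = 0 then cnt.set 0 1 else cnt
  -- top = max(v for v in range(10) if cnt[v] > 0)   (nonempty: cnt[0] ≥ 1, so max never raises)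
  let top := ((PySem.List.max? ((PySem.List.pyRange 0 10 1).filter
      (fun v => decide (0 < cnt.getD v.toNat 0))) (fun x => x)).getD 0)
  -- m = ''.join(str(cnt[v]) for v in range(top+1))
  let m := PySem.Chars.join []
      (((PySem.List.pyRange 0 (top + 1) 1).map (fun v => PySem.Int.toChars (cnt.getD v.toNat 0))))
  (if PySem.Chars.isIn ['0'] m then PySem.Int.ofChars? (m ++ ['1'])
   else PySem.Int.ofChars? (m ++ ['0'])).getD 0

-- ===== PRECONDITION & SPEC =====
-- Pre_ excludes n < 0: there A NEVER RETURNS (the '-' character matches no str(v), so the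
-- while loop runs forever); B raises ValueError there.
def Pre_auto_des (n : Int) : Prop := 0 ≤ n
instance (n : Int) : Decidable (Pre_auto_des n) := by unfold Pre_auto_des; infer_instance
def pvWitness_auto_des : Int := 27
def Spec_auto_des (n : Int) (out : Int) : Prop := out = auto_des_alt n
instance (n : Int) (out : Int) : Decidable (Spec_auto_des n out) := by unfold Spec_auto_des; infer_instance

-- ===== CLAIM (what is proved, stated in full; the proofs are below) =====
def Claim_equal_auto_des : Prop := ∀ (n : Int), Dom_auto_des n → Pre_auto_des n → Spec_auto_des n (auto_des n)

-- ===== LEMMAS AND PROOFS =====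
-- ------- proof-side helpers -------
def pvDigitCh (k : Nat) : Char := Char.ofNat (48 + k)
def pvdval (c : Char) : Nat := c.toNat - 48
def pvIsDigit (c : Char) : Prop := 48 ≤ c.toNat ∧ c.toNat ≤ 57

def pvFinish (s : List Char) : Int :=
  (if PySem.Chars.isIn ['0'] s then PySem.Int.ofChars? (s ++ ['1'])
   else PySem.Int.ofChars? (s ++ ['0'])).getD 0

-- ------- character facts -------
theorem pvchar_eq_of_toNat (c : Char) (k : Nat) (h : c.toNat = k) : c = Char.ofNat k := by
  rw [← h, Char.ofNat_toNat]

theorem pvdigit_cases (c : Char) (h : pvIsDigit c) :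
    c = '0' ∨ c = '1' ∨ c = '2' ∨ c = '3' ∨ c = '4' ∨ c = '5' ∨ c = '6' ∨ c = '7' ∨ c = '8' ∨ c = '9' := by
  obtain ⟨h1, h2⟩ := h
  have hv : c.toNat = 48 ∨ c.toNat = 49 ∨ c.toNat = 50 ∨ c.toNat = 51 ∨ c.toNat = 52 ∨
      c.toNat = 53 ∨ c.toNat = 54 ∨ c.toNat = 55 ∨ c.toNat = 56 ∨ c.toNat = 57 := by omega
  rcases hv with h | h | h | h | h | h | h | h | h | h <;>
    rw [pvchar_eq_of_toNat c _ h] <;> decide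

theorem pvdigitCh_eq_iff (c : Char) (hc : pvIsDigit c) (k : Nat) (hk : k < 10) :
    c = pvDigitCh k ↔ c.toNat = 48 + k := by
  rcases pvdigit_cases _ hc with h | h | h | h | h | h | h | h | h | h <;> subst h <;>
    interval_cases k <;> decide

theorem pvofChars_digit (c : Char) (hc : pvIsDigit c) :
    PySem.Int.ofChars? [c] = some ((c.toNat : Int) - 48) := by
  rcases pvdigit_cases _ hc with h | h | h | h | h | h | h | h | h | h <;> subst h <;> decide

theorem pvmatch_iff (c : Char) (hc : pvIsDigit c) (v : Int) (h0 : 0 ≤ v) (h9 : v < 10) :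
    (String.ofList [c] = PySem.Int.toStr v) ↔ c = pvDigitCh v.toNat := by
  interval_cases v <;>
    rcases pvdigit_cases _ hc with h | h | h | h | h | h | h | h | h | h <;> subst h <;> decide

theorem pvdval_digitCh (k : Nat) (hk : k < 10) : pvdval (pvDigitCh k) = k := by
  interval_cases k <;> decide

-- ------- str(n) consists of digits (n ≥ 0) -------
theorem pvdigitChar_isDigit (k : Nat) (hk : k < 10) : pvIsDigit (Nat.digitChar k) := by
  interval_cases k <;> exact ⟨by decide, by decide⟩

theorem pvtoDigitsCore_isDigit :
    ∀ (f m : Nat) (l : List Char), (∀ c ∈ l, pvIsDigit c) →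
      ∀ c ∈ Nat.toDigitsCore 10 f m l, pvIsDigit c := by
  intro f
  induction f with
  | zero => intro m l hl; simpa [Nat.toDigitsCore] using hl
  | succ f ih =>
    intro m l hl c hc
    rw [Nat.toDigitsCore] at hc
    by_cases h : m / 10 = 0
    · simp only [h] at hc
      rcases List.mem_cons.mp hc with h' | h'
      · subst h'; exact pvdigitChar_isDigit _ (Nat.mod_lt _ (by norm_num))
      · exact hl _ h'
    · simp only [h] at hc
      refine ih _ _ ?_ c hc
      intro d hd
      rcases List.mem_cons.mp hd with h' | h'
      · subst h'; exact pvdigitChar_isDigit _ (Nat.mod_lt _ (by norm_num))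
      · exact hl _ h'

theorem pvtoChars_digits (n : Int) (h : 0 ≤ n) : ∀ c ∈ PySem.Int.toChars n, pvIsDigit c := by
  unfold PySem.Int.toChars
  rw [if_neg (by omega)]
  exact pvtoDigitsCore_isDigit _ _ _ (by simp)

-- ------- the counting fold of A's inner for-loop -------
-- ------- the removal fold of A -------
theorem pvfilter_ne_erase (x : Char) :
    ∀ r : List Char, (r.erase x).filter (fun c => !(c == x)) = r.filter (fun c => !(c == x)) := by
  intro r
  induction r with
  | nil => simp
  | cons c t ih =>
    by_cases h : c = x
    · subst h; simp [List.erase_cons_head]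
    · rw [List.erase_cons_tail (by simpa using h)]
      simp [h, ih]

theorem pverase_rep (x : Char) :
    ∀ (k : Nat) (r : List Char), r.count x = k →
      (List.replicate k x).foldl (fun rr z => (PySem.List.remove? rr z).getD rr) r
        = r.filter (fun c => !(c == x)) := by
  intro k
  induction k with
  | zero =>
    intro r h
    have hx : x ∉ r := by simpa using (List.count_eq_zero.mp h)
    simp only [List.replicate, List.foldl_nil]
    rw [List.filter_eq_self.mpr]
    intro c hc
    simp only [Bool.not_eq_eq_eq_not, Bool.not_true, beq_eq_false_iff_ne, ne_eq]
    intro h'; subst h'; exact hx hc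
  | succ k ih =>
    intro r h
    have hx : x ∈ r := List.count_pos_iff.mp (by omega)
    simp only [List.replicate, List.foldl_cons]
    rw [PySem.List.remove?_eq_some_erase r x hx]
    simp only [Option.getD_some]
    rw [ih (r.erase x) (by rw [List.count_erase_self]; omega)]
    exact pvfilter_ne_erase x r
-- ------- specialized counting fold (A's inner for-loop) -------
theorem pvfold_countv (v : Int) :
    ∀ (r : List Char) (a : Int) (j : List Char),
      r.foldl (fun (q : Int × List Char) i =>
          if String.ofList [i] = PySem.Int.toStr v then (q.1 + 1, q.2 ++ [i]) else q) (a, j)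
        = (a + (r.countP (fun c => decide (String.ofList [c] = PySem.Int.toStr v)) : Int),
           j ++ r.filter (fun c => decide (String.ofList [c] = PySem.Int.toStr v))) := by
  intro r
  induction r with
  | nil => intro a j; simp
  | cons c t ih =>
    intro a j
    by_cases h : String.ofList [c] = PySem.Int.toStr v
    · rw [List.foldl_cons, if_pos h, ih]
      simp [h, Prod.ext_iff]
      ring
    · rw [List.foldl_cons, if_neg h, ih]
      simp [h]

theorem pvjoin_nil_cons (a : List Char) (l : List (List Char)) :
    PySem.Chars.join [] (a :: l) = a ++ PySem.Chars.join [] l := by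
  cases l with
  | nil => simp [PySem.Chars.join_singleton, PySem.Chars.join_nil]
  | cons b r => rw [PySem.Chars.join_cons_cons]; simp

-- ------- A's loop, characterized on the state it maintains -------
theorem pvloop_eq (ds : List Char) (hd : ∀ c ∈ ds, pvIsDigit c) (T : Nat) (hT : T ≤ 9)
    (hmem : pvDigitCh T ∈ ds) (hub : ∀ c ∈ ds, pvdval c ≤ T) :
    ∀ (fuel k : Nat) (m : List Char), k ≤ T → T + 1 - k ≤ fuel →
      auto_des_loop fuel (ds.filter (fun c => decide (k ≤ pvdval c))) m (k : Int)
        = pvFinish (m ++ PySem.Chars.join []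
            ((PySem.List.pyRange (k : Int) ((T : Int) + 1) 1).map
              (fun v => PySem.Int.toChars ((ds.count (pvDigitCh v.toNat) : Int))))) := by
  intro fuel
  induction fuel with
  | zero => intro k m hk hf; omega
  | succ fuel ih =>
    intro k m hk hf
    have hk10 : k < 10 := by omega
    simp only [auto_des_loop]
    rw [pvfold_countv]
    -- the match predicate coincides with (· == pvDigitCh k) on the digit chars of the state
    have hpred : ∀ c ∈ ds.filter (fun c => decide (k ≤ pvdval c)),
        (decide (String.ofList [c] = PySem.Int.toStr (k : Int))) = (c == pvDigitCh k) := by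
      intro c hc
      have hdc := hd c (List.mem_of_mem_filter hc)
      have hiff := pvmatch_iff c hdc (k : Int) (by positivity) (by exact_mod_cast hk10)
      simp only [Int.toNat_natCast] at hiff
      rw [Bool.eq_iff_iff]
      simp [hiff]
    rw [List.countP_congr (fun c hc => by rw [hpred c hc]), List.filter_congr hpred]
    have hcount_eq : (ds.filter (fun c => decide (k ≤ pvdval c))).countP (fun c => c == pvDigitCh k)
        = ds.count (pvDigitCh k) := by
      show (ds.filter (fun c => decide (k ≤ pvdval c))).count (pvDigitCh k) = ds.count (pvDigitCh k)
      exact List.count_filter (by simp [pvdval_digitCh k hk10])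
    rw [hcount_eq, List.filter_beq]
    simp only [zero_add, List.nil_append]
    rw [pverase_rep (pvDigitCh k) _ _ rfl, List.filter_filter]
    -- the remaining chars are exactly those of digit value ≥ k+1
    have hstep : ds.filter (fun a => (!(a == pvDigitCh k)) && decide (k ≤ pvdval a))
        = ds.filter (fun c => decide (k + 1 ≤ pvdval c)) := by
      refine List.filter_congr ?_
      intro c hc
      have hdc := hd c hc
      by_cases hxc : c = pvDigitCh k
      · subst hxc
        simp [pvdval_digitCh k hk10]
      · have hb : (c == pvDigitCh k) = false := by simpa using hxc
        have hne : c.toNat ≠ 48 + k := fun hh => hxc ((pvdigitCh_eq_iff c hdc k hk10).mpr hh)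
        have h48 := hdc.1
        have hiff2 : (k ≤ pvdval c) ↔ (k + 1 ≤ pvdval c) := by unfold pvdval at *; omega
        simp [hb, hiff2]
    rw [hstep]
    rcases Nat.eq_or_lt_of_le hk with hkT | hkT
    · -- k = T : last round, the loop returns
      subst hkT
      have hnil : ds.filter (fun c => decide (k + 1 ≤ pvdval c)) = [] := by
        rw [List.filter_eq_nil_iff]
        intro c hc
        have := hub c hc
        simp only [decide_eq_true_eq]
        omega
      rw [if_pos hnil]
      have hr : PySem.List.pyRange (k : Int) ((k : Int) + 1) 1 = [(k : Int)] :=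
        PySem.List.pyRange_one_singleton _
      rw [hr]
      simp [pvFinish, Int.toNat_natCast]
    · -- k < T : one more round
      have hne : ds.filter (fun c => decide (k + 1 ≤ pvdval c)) ≠ [] := by
        have hm : pvDigitCh T ∈ ds.filter (fun c => decide (k + 1 ≤ pvdval c)) := by
          refine List.mem_filter.mpr ⟨hmem, ?_⟩
          simp only [pvdval_digitCh T (by omega), decide_eq_true_eq]
          omega
        exact List.ne_nil_of_mem hm
      rw [if_neg hne]
      have hcast : ((k : Int) + 1) = ((k + 1 : Nat) : Int) := by push_cast; ring
      rw [hcast, ih (k + 1) _ (by omega) (by omega)]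
      have hsplit : PySem.List.pyRange (k : Int) ((T : Int) + 1) 1
          = (k : Int) :: PySem.List.pyRange ((k : Int) + 1) ((T : Int) + 1) 1 := by
        exact PySem.List.pyRange_one_cons (by omega)
      rw [hsplit, List.map_cons, pvjoin_nil_cons]
      rw [Int.toNat_natCast, ← hcast]
      simp [List.append_assoc]
-- ------- digit strings of A's and B's shared pipeline -------
def pvDS (n : Int) : List Char := PySem.Int.toChars n
def pvDS' (n : Int) : List Char := if '0' ∈ pvDS n then pvDS n else pvDS n ++ ['0']

theorem pvDS'_digits (n : Int) (h : 0 ≤ n) : ∀ c ∈ pvDS' n, pvIsDigit c := by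
  intro c hc
  unfold pvDS' pvDS at hc
  split at hc
  · exact pvtoChars_digits n h c hc
  · rcases List.mem_append.mp hc with h' | h'
    · exact pvtoChars_digits n h c h'
    · rcases List.mem_singleton.mp h' with rfl
      exact ⟨by decide, by decide⟩

theorem pvDS'_zero_mem (n : Int) : '0' ∈ pvDS' n := by
  unfold pvDS'
  by_cases h0 : '0' ∈ pvDS n <;> simp [h0]

-- ------- A's program equals the common normal form -------
theorem pvA_eq (n : Int) (h : 0 ≤ n) (T : Nat) (hT : T ≤ 9) (hmem : pvDigitCh T ∈ pvDS' n)
    (hub : ∀ c ∈ pvDS' n, pvdval c ≤ T) :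
    auto_des n = pvFinish (PySem.Chars.join [] ((PySem.List.pyRange 0 ((T : Int) + 1) 1).map
        (fun v => PySem.Int.toChars (((pvDS' n).count (pvDigitCh v.toNat) : Int))))) := by
  have hd' : ∀ c ∈ pvDS' n, pvIsDigit c := pvDS'_digits n h
  have hloop := pvloop_eq (pvDS' n) hd' T hT hmem hub 11 0 [] (by omega) (by omega)
  simp only [Nat.cast_zero, List.nil_append] at hloop
  have hfilt : (pvDS' n).filter (fun c => decide ((0 : Nat) ≤ pvdval c)) = pvDS' n := by
    simp
  rw [hfilt] at hloop
  simp only [auto_des, PySem.Int.toList_toStr]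
  exact hloop

-- ------- the count fold of B -------
theorem pvcnt_fold (ds : List Char) (hd : ∀ c ∈ ds, pvIsDigit c) :
    ∀ (l : List Int), l.length = 10 →
      ((ds.foldl (fun (cnt : List Int) c =>
          let idx := ((PySem.Int.ofChars? [c]).getD 0).toNat
          cnt.set idx (cnt.getD idx 0 + 1)) l).length = 10
       ∧ ∀ v, v < 10 →
          (ds.foldl (fun (cnt : List Int) c =>
            let idx := ((PySem.Int.ofChars? [c]).getD 0).toNat
            cnt.set idx (cnt.getD idx 0 + 1)) l).getD v 0
            = l.getD v 0 + (ds.count (pvDigitCh v) : Int)) := by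
  induction ds with
  | nil => intro l hl; simp [hl]
  | cons c t ih =>
    intro l hl
    have hdc : pvIsDigit c := hd c List.mem_cons_self
    have hdt : ∀ d ∈ t, pvIsDigit d := fun d hdm => hd d (List.mem_cons_of_mem _ hdm)
    have h48 := hdc.1
    have h57 := hdc.2
    have hidx : ((PySem.Int.ofChars? [c]).getD 0).toNat = pvdval c := by
      rw [pvofChars_digit c hdc]
      simp only [Option.getD_some]
      unfold pvdval; omega
    simp only [List.foldl_cons, hidx]
    have hdval9 : pvdval c < 10 := by unfold pvdval; omega
    have hlen1 : (l.set (pvdval c) (l.getD (pvdval c) 0 + 1)).length = 10 := by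
      rw [List.length_set]; exact hl
    obtain ⟨ih1, ih2⟩ := ih hdt _ hlen1
    refine ⟨ih1, ?_⟩
    intro v hv
    rw [ih2 v hv]
    have hset : (l.set (pvdval c) (l.getD (pvdval c) 0 + 1)).getD v 0
        = l.getD v 0 + (if pvdval c = v then 1 else 0) := by
      show ((l.set (pvdval c) (l.getD (pvdval c) 0 + 1))[v]?).getD 0 = _
      rw [List.getElem?_set]
      by_cases hiv : pvdval c = v
      · rw [if_pos hiv, if_pos (by omega)]
        subst hiv
        simp [List.getD]
      · rw [if_neg hiv, if_neg hiv]
        simp [List.getD, add_zero]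
    rw [hset]
    have hcv : c = pvDigitCh v ↔ pvdval c = v := by
      rw [pvdigitCh_eq_iff c hdc v hv]
      unfold pvdval; omega
    rw [List.count_cons]
    by_cases hiv : pvdval c = v
    · rw [if_pos hiv]
      have hb : (c == pvDigitCh v) = true := beq_iff_eq.mpr (hcv.mpr hiv)
      rw [hb, if_pos rfl]
      push_cast; ring
    · rw [if_neg hiv]
      have hb : (c == pvDigitCh v) = false := by
        simp only [beq_eq_false_iff_ne, ne_eq]
        intro hh; exact hiv (hcv.mp hh)
      rw [hb, if_neg (by simp)]
      push_cast; ring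

-- ------- B's tail: top and the joined count string, for an abstract count table -------
theorem pvB_tail (ds' : List Char) (hd' : ∀ c ∈ ds', pvIsDigit c) (h0 : '0' ∈ ds')
    (cnt : List Int) (hcnt : ∀ v, v < 10 → cnt.getD v 0 = (ds'.count (pvDigitCh v) : Int)) :
    ∃ T : Nat, T ≤ 9 ∧ pvDigitCh T ∈ ds' ∧ (∀ c ∈ ds', pvdval c ≤ T) ∧
      PySem.Chars.join [] (((PySem.List.pyRange 0
          (((PySem.List.max? ((PySem.List.pyRange 0 10 1).filter
              (fun v => decide (0 < cnt.getD v.toNat 0))) (fun x => x)).getD 0) + 1) 1).map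
          (fun v => PySem.Int.toChars (cnt.getD v.toNat 0))))
        = PySem.Chars.join [] (((PySem.List.pyRange 0 ((T : Int) + 1) 1).map
          (fun v => PySem.Int.toChars ((ds'.count (pvDigitCh v.toNat) : Int))))) := by
  have h0S : (0 : Int) ∈ (PySem.List.pyRange 0 10 1).filter
      (fun v => decide (0 < cnt.getD v.toNat 0)) := by
    refine List.mem_filter.mpr ⟨PySem.List.mem_pyRange_one.mpr (by omega), ?_⟩
    have hc0 := hcnt 0 (by omega)
    have hch : pvDigitCh 0 = '0' := by decide
    simp only [Int.toNat_zero, decide_eq_true_eq]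
    rw [hc0, hch]
    exact_mod_cast List.count_pos_iff.mpr h0
  obtain ⟨mv, hmv⟩ : ∃ mv, PySem.List.max? ((PySem.List.pyRange 0 10 1).filter
      (fun v => decide (0 < cnt.getD v.toNat 0))) (fun x => x) = some mv := by
    cases hmax : PySem.List.max? ((PySem.List.pyRange 0 10 1).filter
        (fun v => decide (0 < cnt.getD v.toNat 0))) (fun x => x) with
    | none =>
      exfalso
      have := (PySem.List.max?_eq_none_iff _ _).mp hmax
      rw [this] at h0S
      exact (List.not_mem_nil) h0S
    | some m => exact ⟨m, rfl⟩
  have hmvS := PySem.List.max?_mem hmv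
  have hmv_range := (List.mem_filter.mp hmvS).1
  have hmv_pos := (List.mem_filter.mp hmvS).2
  have hmv_bounds : 0 ≤ mv ∧ mv < 10 := PySem.List.mem_pyRange_one.mp hmv_range
  refine ⟨mv.toNat, by omega, ?_, ?_, ?_⟩
  · -- the top digit occurs in ds'
    have hcm := hcnt mv.toNat (by omega)
    simp only [decide_eq_true_eq] at hmv_pos
    rw [hcm] at hmv_pos
    exact List.count_pos_iff.mp (by exact_mod_cast hmv_pos)
  · -- every digit of ds' is at most top
    intro c hc
    have hdc := hd' c hc
    have hdv10 : pvdval c < 10 := by have := hdc.2; unfold pvdval; omega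
    have hceq : c = pvDigitCh (pvdval c) := by
      refine pvchar_eq_of_toNat c _ ?_
      have := hdc.1; unfold pvdval; omega
    have hmemS : ((pvdval c : Int)) ∈ (PySem.List.pyRange 0 10 1).filter
        (fun v => decide (0 < cnt.getD v.toNat 0)) := by
      refine List.mem_filter.mpr ⟨PySem.List.mem_pyRange_one.mpr (by omega), ?_⟩
      simp only [Int.toNat_natCast, decide_eq_true_eq]
      rw [hcnt (pvdval c) hdv10]
      have hmm : pvDigitCh (pvdval c) ∈ ds' := hceq ▸ hc
      exact_mod_cast List.count_pos_iff.mpr hmm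
    have := PySem.List.max?_isMax hmv _ hmemS
    omega
  · -- the joined strings coincide
    rw [hmv]
    simp only [Option.getD_some]
    have hcast : mv = ((mv.toNat : Nat) : Int) := by omega
    rw [hcast]
    refine congrArg _ (List.map_congr_left ?_)
    intro v hv
    have hvb := PySem.List.mem_pyRange_one.mp hv
    have hv10 : v.toNat < 10 := by omega
    rw [hcnt v.toNat hv10]

-- ------- B's program equals the common normal form for some witness top T -------
theorem pvB_eq (n : Int) (h : 0 ≤ n) :
    ∃ T : Nat, T ≤ 9 ∧ pvDigitCh T ∈ pvDS' n ∧ (∀ c ∈ pvDS' n, pvdval c ≤ T) ∧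
      auto_des_alt n = pvFinish (PySem.Chars.join [] ((PySem.List.pyRange 0 ((T : Int) + 1) 1).map
        (fun v => PySem.Int.toChars (((pvDS' n).count (pvDigitCh v.toNat) : Int))))) := by
  have hdds := pvtoChars_digits n h
  obtain ⟨hlenF, hgetF⟩ := pvcnt_fold (PySem.Int.toChars n) hdds (List.replicate 10 0) (by simp)
  have hF : ∀ v, v < 10 →
      (List.foldl
          (fun (cnt : List Int) c =>
            cnt.set ((PySem.Int.ofChars? [c]).getD 0).toNat
              (cnt.getD ((PySem.Int.ofChars? [c]).getD 0).toNat 0 + 1))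
          (List.replicate 10 0) (PySem.Int.toChars n)).getD v 0
        = ((PySem.Int.toChars n).count (pvDigitCh v) : Int) := by
    intro v hv
    have hgv := hgetF v hv
    rw [List.getD_replicate _ hv] at hgv
    simpa using hgv


  have hlenF' : (List.foldl
          (fun (cnt : List Int) c =>
            cnt.set ((PySem.Int.ofChars? [c]).getD 0).toNat
              (cnt.getD ((PySem.Int.ofChars? [c]).getD 0).toNat 0 + 1))
          (List.replicate 10 0) (PySem.Int.toChars n)).length = 10 := by simpa using hlenF
  have hch0 : pvDigitCh 0 = '0' := by decide
  by_cases h0 : '0' ∈ PySem.Int.toChars n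
  · -- '0' occurs in str(n): A appends nothing, B's count table is unadjusted
    have hpos : 0 < List.count '0' (PySem.Int.toChars n) := List.count_pos_iff.mpr h0
    have hne : ¬ ((List.foldl
          (fun (cnt : List Int) c =>
            cnt.set ((PySem.Int.ofChars? [c]).getD 0).toNat
              (cnt.getD ((PySem.Int.ofChars? [c]).getD 0).toNat 0 + 1))
          (List.replicate 10 0) (PySem.Int.toChars n)).getD 0 0 = 0) := by
      rw [hF 0 (by omega), hch0]
      exact_mod_cast hpos.ne'
    have hds' : pvDS' n = PySem.Int.toChars n := by
      unfold pvDS' pvDS; rw [if_pos h0]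
    have hcnt' : ∀ v, v < 10 → (List.foldl
          (fun (cnt : List Int) c =>
            cnt.set ((PySem.Int.ofChars? [c]).getD 0).toNat
              (cnt.getD ((PySem.Int.ofChars? [c]).getD 0).toNat 0 + 1))
          (List.replicate 10 0) (PySem.Int.toChars n)).getD v 0 = ((pvDS' n).count (pvDigitCh v) : Int) := by
      intro v hv; rw [hds']; exact hF v hv
    obtain ⟨T, hT, hmem, hub, hM⟩ :=
      pvB_tail (pvDS' n) (pvDS'_digits n h) (pvDS'_zero_mem n) _ hcnt'
    refine ⟨T, hT, hmem, hub, ?_⟩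
    simp only [auto_des_alt, PySem.Int.toList_toStr]
    rw [if_neg hne, hM]
    simp [pvFinish]
  · -- '0' does not occur: A appends '0', B bumps slot 0 to 1
    have hc0 : List.count '0' (PySem.Int.toChars n) = 0 := by
      exact List.count_eq_zero.mpr h0
    have heq0 : (List.foldl
          (fun (cnt : List Int) c =>
            cnt.set ((PySem.Int.ofChars? [c]).getD 0).toNat
              (cnt.getD ((PySem.Int.ofChars? [c]).getD 0).toNat 0 + 1))
          (List.replicate 10 0) (PySem.Int.toChars n)).getD 0 0 = 0 := by
      rw [hF 0 (by omega), hch0, hc0]; rfl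
    have hds' : pvDS' n = PySem.Int.toChars n ++ ['0'] := by
      unfold pvDS' pvDS; rw [if_neg h0]
    have hcnt' : ∀ v, v < 10 →
        ((List.foldl
          (fun (cnt : List Int) c =>
            cnt.set ((PySem.Int.ofChars? [c]).getD 0).toNat
              (cnt.getD ((PySem.Int.ofChars? [c]).getD 0).toNat 0 + 1))
          (List.replicate 10 0) (PySem.Int.toChars n)).set 0 1).getD v 0 = ((pvDS' n).count (pvDigitCh v) : Int) := by
      intro v hv
      rw [hds']
      by_cases hv0 : v = 0
      · subst hv0
        show (((List.foldl
          (fun (cnt : List Int) c =>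
            cnt.set ((PySem.Int.ofChars? [c]).getD 0).toNat
              (cnt.getD ((PySem.Int.ofChars? [c]).getD 0).toNat 0 + 1))
          (List.replicate 10 0) (PySem.Int.toChars n)).set 0 1)[0]?).getD 0 = _
        rw [List.getElem?_set, if_pos rfl, if_pos (by omega)]
        rw [hch0, List.count_append, hc0]
        simp
      · show (((List.foldl
          (fun (cnt : List Int) c =>
            cnt.set ((PySem.Int.ofChars? [c]).getD 0).toNat
              (cnt.getD ((PySem.Int.ofChars? [c]).getD 0).toNat 0 + 1))
          (List.replicate 10 0) (PySem.Int.toChars n)).set 0 1)[v]?).getD 0 = _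
        rw [List.getElem?_set, if_neg (fun hh => hv0 hh.symm)]
        have hstep : ((List.foldl
          (fun (cnt : List Int) c =>
            cnt.set ((PySem.Int.ofChars? [c]).getD 0).toNat
              (cnt.getD ((PySem.Int.ofChars? [c]).getD 0).toNat 0 + 1))
          (List.replicate 10 0) (PySem.Int.toChars n)).getD v 0) = ((PySem.Int.toChars n).count (pvDigitCh v) : Int) :=
          hF v hv
        have hz : List.count (pvDigitCh v) ['0'] = 0 := by
          refine List.count_eq_zero.mpr (fun hmem2 => ?_)
          have hh := List.mem_singleton.mp hmem2
          have h48' := (pvdigitCh_eq_iff '0' ⟨by decide, by decide⟩ v hv).mp hh.symm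
          have h48'' : '0'.toNat = 48 := by decide
          omega
        rw [List.count_append, hz]
        simpa [List.getD] using hstep
    obtain ⟨T, hT, hmem, hub, hM⟩ :=
      pvB_tail (pvDS' n) (pvDS'_digits n h) (pvDS'_zero_mem n) _ hcnt'
    refine ⟨T, hT, hmem, hub, ?_⟩
    simp only [auto_des_alt, PySem.Int.toList_toStr]
    rw [if_pos heq0, hM]
    simp [pvFinish]

-- ------- main equivalence on the precondition -------
theorem pv_main (n : Int) (h : 0 ≤ n) : auto_des n = auto_des_alt n := by
  obtain ⟨T, hT, hmem, hub, hB⟩ := pvB_eq n h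
  rw [hB, pvA_eq n h T hT hmem hub]

-- ===== VERDICT (by name: the statement is the Claim_ definition above) =====
theorem auto_des_spec : Claim_equal_auto_des := by
  intro n _ hpre
  show auto_des n = auto_des_alt n
  exact pv_main n hpre
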